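-- pv_equiv track=rewrite | github.com/codehyunn/Algorithm-study | 프로그래머스/unrated/133502. 햄버거 만들기/햄버거 만들기.py | solution
-- ===== SOURCE A (Python) =====
-- def solution(ingredient):
--     answer = 0
--     if len(ingredient) >= 4 :
--         i = 4
--         while ingredient :
--             if ingredient[i-4:i] == [1,2,3,1]:
--                 del ingredient[i-4:i]
--                 answer += 1
--                 i -= 4
--             if i == len(ingredient)+1 :
--                 break
--             i += 1
--     return answer
-- ===== SOURCE B (Python) =====
-- def solution(ingredient):
--     # One-pass stack: push each ingredient, pop a burger when the top 4 are [1,2,3,1].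
--     # (Unlike A, this does not mutate the argument; equivalence is about the return value.)
--     stack = []
--     answer = 0
--     for x in ingredient:
--         stack.append(x)
--         if stack[-4:] == [1, 2, 3, 1]:
--             del stack[-4:]
--             answer += 1
--     return answer
-- ===== Notes on version B (the rewrite author's own statement) =====
-- stated objective: faster
-- what changed: Replaced A's index-rewinding scan with repeated list-slice deletions on the input by a single left-to-right pass maintaining a stack that pops a burger whenever its top four elements are [1,2,3,1].
import Mathlib
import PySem

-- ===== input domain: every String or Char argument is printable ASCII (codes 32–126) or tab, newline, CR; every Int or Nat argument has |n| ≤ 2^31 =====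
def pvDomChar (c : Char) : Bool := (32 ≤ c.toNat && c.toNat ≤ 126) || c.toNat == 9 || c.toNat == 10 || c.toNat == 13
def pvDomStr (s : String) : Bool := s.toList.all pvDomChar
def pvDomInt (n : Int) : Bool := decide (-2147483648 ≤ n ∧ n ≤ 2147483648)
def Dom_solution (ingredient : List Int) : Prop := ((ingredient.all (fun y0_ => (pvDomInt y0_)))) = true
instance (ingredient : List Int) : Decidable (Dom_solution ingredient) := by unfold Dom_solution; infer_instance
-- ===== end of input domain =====

-- B replaces A's O(n^2) index-rewinding scan (with slice deletions on the input, which A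
-- mutates in place; the equivalence proved here is about the return value) by one O(n)
-- stack pass that pops a burger whenever the stack's top four elements are [1,2,3,1].

-- ===== PORT A =====
-- A's while loop: fuel is a totality guard only (the entry call provably never exhausts it).
-- `del ingredient[i-4:i]` is ported as l[:i-4] ++ l[i:], exact here because the deleting
-- branch only fires when l[i-4:i] = [1,2,3,1], which forces 4 ≤ i ≤ l.length.
def solutionLoop (fuel : Nat) (l : List Int) (i a : Int) : Int :=
  match fuel with
  | 0 => a
  | fuel + 1 =>
    if l = [] then a
    else
      let s := if PySem.List.slice l (some (i - 4)) (some i) = [1, 2, 3, 1] then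
          (PySem.List.slice l none (some (i - 4)) ++ PySem.List.slice l (some i) none,
           i - 4, a + 1)
        else (l, i, a)
      if s.2.1 = (s.1.length : Int) + 1 then s.2.2
      else solutionLoop fuel s.1 (s.2.1 + 1) s.2.2

def solution (ingredient : List Int) : Int :=
  if (ingredient.length : Int) ≥ 4 then
    solutionLoop (3 * ingredient.length + 2) ingredient 4 0
  else 0

-- ===== PORT B =====
-- one step of B's for-loop: push x, pop four and count when stack[-4:] == [1,2,3,1]
def altStep (s : List Int × Int) (x : Int) : List Int × Int :=
  let st := s.1 ++ [x]
  if PySem.List.slice st (some (-4)) none = [1, 2, 3, 1] then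
    (PySem.List.slice st none (some (-4)), s.2 + 1)
  else (st, s.2)

def solution_alt (ingredient : List Int) : Int :=
  (ingredient.foldl altStep ([], 0)).2

-- ===== PRECONDITION & SPEC =====
def Spec_solution (ingredient : List Int) (out : Int) : Prop := out = solution_alt ingredient
instance (ingredient : List Int) (out : Int) : Decidable (Spec_solution ingredient out) := by unfold Spec_solution; infer_instance

-- ===== CLAIM (what is proved, stated in full; the proofs are below) =====
def Claim_equal_solution : Prop := ∀ (ingredient : List Int), Dom_solution ingredient → Spec_solution ingredient (solution ingredient)

-- ===== LEMMAS AND PROOFS =====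

-- "l has no occurrence of [1,2,3,1] starting strictly before position s"
def NoOcc (l : List Int) (s : Int) : Prop :=
  ∀ q : Nat, (q : Int) < s → (l.drop q).take 4 ≠ [1, 2, 3, 1]

-- fully pattern-free (no contiguous occurrence of [1,2,3,1] at all)
def PatFree (l : List Int) : Prop :=
  ∀ q : Nat, (l.drop q).take 4 ≠ [1, 2, 3, 1]

lemma altStep_eq (st : List Int) (c : Int) (x : Int) :
    altStep (st, c) x =
      if (st ++ [x]).drop (st.length + 1 - 4) = [1, 2, 3, 1] then
        ((st ++ [x]).take (st.length + 1 - 4), c + 1)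
      else (st ++ [x], c) := by
  show (if PySem.List.slice (st ++ [x]) (some (-4)) none = [1, 2, 3, 1] then
      (PySem.List.slice (st ++ [x]) none (some (-4)), c + 1) else (st ++ [x], c)) = _
  rw [PySem.List.slice_from_neg_ofNat (st ++ [x]) 4 (by omega),
      PySem.List.slice_to_neg_ofNat (st ++ [x]) 4 (by omega)]
  simp

lemma foldl_altStep_snd (v : List Int) : ∀ (st : List Int) (c : Int),
    (v.foldl altStep (st, c)).2 = (v.foldl altStep (st, 0)).2 + c := by
  induction v with
  | nil => intro st c; simp
  | cons x v ih =>
    intro st c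
    simp only [List.foldl_cons, altStep_eq]
    split
    · rw [ih _ (c+1), ih _ (0+1)]; ring
    · exact ih _ c

-- window fully inside a prefix
lemma window_prefix (u w : List Int) (q : Nat) (h : q + 4 ≤ u.length) :
    ((u ++ w).drop q).take 4 = (u.drop q).take 4 := by
  rw [List.drop_append_of_le_length (by omega), List.take_append_of_le_length (by simp; omega)]

lemma foldl_altStep_patfree (xs : List Int) (c : Int) (h : PatFree xs) :
    xs.foldl altStep ([], c) = (xs, c) := by
  induction xs using List.reverseRecOn with
  | nil => simp
  | append_singleton ys x ih =>
    have hys : PatFree ys := by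
      intro q hq
      have := h q
      rw [window_prefix ys [x] q ?_] at this
      · exact this hq
      · by_contra hlen
        have h2 : (ys.drop q).take 4 = ys.drop q := by
          apply List.take_of_length_le; simp; omega
        rw [h2] at hq
        have := congrArg List.length hq
        simp at this; omega
    rw [List.foldl_append, ih hys]
    simp only [List.foldl_cons, List.foldl_nil, altStep_eq]
    split
    · next heq =>
      exfalso
      have hlen := congrArg List.length heq
      simp at hlen
      apply h (ys.length + 1 - 4)
      rw [List.take_of_length_le (by simp; omega)]
      exact heq
    · rfl

lemma take4_short (l : List Int) (q : Nat) (h : l.length < q + 4) :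
    (l.drop q).take 4 ≠ [1, 2, 3, 1] := by
  intro heq
  have := congrArg List.length heq
  simp at this; omega

lemma drop_last (l : List Int) (n : Nat) (x : Int) (h : (l ++ [x]).drop n = [1, 2, 3, 1]) :
    x = 1 := by
  by_cases hn : n ≤ l.length
  · rw [List.drop_append_of_le_length hn] at h
    have := congrArg List.getLast? h
    simpa using this
  · have := congrArg List.length h
    simp at this; omega

lemma count_remove (u v : List Int) (c : Int)
    (h : ∀ q : Nat, q < u.length → ((u ++ [1, 2, 3, 1]).drop q).take 4 ≠ [1, 2, 3, 1]) :
    ((u ++ [1, 2, 3, 1] ++ v).foldl altStep ([], c)).2 = ((u ++ v).foldl altStep ([], c)).2 + 1 := by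
  have hu : PatFree u := by
    intro q
    by_cases hq : q + 4 ≤ u.length
    · rw [← window_prefix u [1,2,3,1] q hq]; exact h q (by omega)
    · exact take4_short u q (by omega)
  have hfold : ∀ w : List Int, ((u ++ w).foldl altStep ([], c)) = w.foldl altStep (u, c) := by
    intro w; rw [List.foldl_append, foldl_altStep_patfree u c hu]
  -- four pushes of [1,2,3,1] from stack u give back stack u and one more burger
  have s1 : altStep (u, c) 1 = (u ++ [1], c) := by
    rw [altStep_eq, if_neg]
    intro heq
    by_cases h3 : 3 ≤ u.length
    · apply h (u.length + 1 - 4) (by omega)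
      have e : u ++ [1,2,3,1] = (u ++ [1]) ++ [2,3,1] := by simp
      rw [e, window_prefix (u ++ [1]) [2,3,1] _ (by simp; omega),
          List.take_of_length_le (by rw [heq]; simp)]
      exact heq
    · have := congrArg List.length heq; simp at this; omega
  have s2 : altStep (u ++ [1], c) 2 = (u ++ [1] ++ [2], c) := by
    rw [altStep_eq, if_neg]
    intro heq
    have h2 := drop_last (u ++ [1]) _ 2 heq
    omega
  have s3 : altStep (u ++ [1] ++ [2], c) 3 = (u ++ [1] ++ [2] ++ [3], c) := by
    rw [altStep_eq, if_neg]
    intro heq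
    have h2 := drop_last (u ++ [1] ++ [2]) _ 3 heq
    omega
  have s4 : altStep (u ++ [1] ++ [2] ++ [3], c) 1 = (u, c + 1) := by
    rw [altStep_eq]
    have e : u ++ [1] ++ [2] ++ [3] ++ [1] = u ++ [1,2,3,1] := by simp
    have hl : (u ++ [1] ++ [2] ++ [3]).length + 1 - 4 = u.length := by simp
    rw [e, hl, if_pos List.drop_left, List.take_left]
  have hP : ([1,2,3,1] : List Int).foldl altStep (u, c) = (u, c + 1) := by
    simp only [List.foldl_cons, List.foldl_nil, s1, s2, s3, s4]
  rw [List.append_assoc, hfold ([1,2,3,1] ++ v), hfold v, List.foldl_append, hP,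
      foldl_altStep_snd v u (c+1), foldl_altStep_snd v u c]
  ring

lemma patfree_count (l : List Int) (h : PatFree l) : (l.foldl altStep ([], 0)).2 = 0 := by
  rw [foldl_altStep_patfree l 0 h]

lemma patfree_short (l : List Int) (h : l.length < 4) : PatFree l :=
  fun q => take4_short l q (by omega)

-- the window slice, as drop/take, for a nonnegative start
lemma slice_window (l : List Int) (i : Int) (h4 : 4 ≤ i) :
    PySem.List.slice l (some (i - 4)) (some i) = (l.drop (i - 4).toNat).take 4 := by
  rw [PySem.List.slice_toNat l (by omega) (by omega)]
  congr 1
  omega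

-- a window inside the kept prefix, through take
lemma window_take (l : List Int) (q p : Nat) (h : p + 4 ≤ q) :
    ((l.take q).drop p).take 4 = (l.drop p).take 4 := by
  rw [List.drop_take, List.take_take]
  congr 1
  omega

lemma solutionLoop_eq (fuel : Nat) :
    ∀ (l : List Int) (i a : Int), 0 ≤ i → i ≤ (l.length : Int) + 1 →
      2 * l.length + ((l.length : Int) + 1 - i).toNat ≤ fuel → NoOcc l (i - 4) →
      solutionLoop fuel l i a = a + (l.foldl altStep ([], 0)).2 := by
  induction fuel with
  | zero =>
    intro l i a _ _ hfuel _
    have : l.length = 0 := by omega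
    have hl : l = [] := List.length_eq_zero_iff.mp this
    subst hl
    simp [solutionLoop]
  | succ fuel ih =>
    intro l i a hi0 hile hfuel hnoocc
    rw [solutionLoop]
    by_cases hnil : l = []
    · subst hnil; simp
    rw [if_neg hnil]
    by_cases hslice : PySem.List.slice l (some (i - 4)) (some i) = [1, 2, 3, 1]
    · -- the window matches: 4 ≤ i ≤ l.length, and l = u ++ [1,2,3,1] ++ v
      have h4 : 4 ≤ i := by
        by_contra h4
        have hlen := congrArg List.length hslice
        rw [PySem.List.length_slice] at hlen
        simp only [List.length_cons, List.length_nil] at hlen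
        have hi' : i = ((i.toNat : Nat) : Int) := by omega
        have h1 : PySem.List.clampIdx l.length i = min i.toNat l.length := by
          rw [hi', PySem.List.clampIdx_natCast]
          omega
        omega
      have hmatch := hslice
      rw [slice_window l i h4] at hmatch
      set q : Nat := (i - 4).toNat with hq
      have hiq : (q : Int) = i - 4 := by omega
      have hlen4 : q + 4 ≤ l.length := by
        have := congrArg List.length hmatch
        simp at this
        omega
      set u : List Int := l.take q with hu
      set v : List Int := l.drop (q + 4) with hv
      have hul : u.length = q := by rw [hu, List.length_take]; omega
      have hdecomp : l = u ++ [1,2,3,1] ++ v := by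
        rw [List.append_assoc, ← hmatch, hu, hv, ← List.drop_drop, List.take_append_drop,
            List.take_append_drop]
      rw [if_pos hslice]
      simp only
      -- the deleted-slice list is u ++ v
      have hdel : PySem.List.slice l none (some (i - 4)) ++ PySem.List.slice l (some i) none
          = u ++ v := by
        have hit : i.toNat = q + 4 := by omega
        rw [PySem.List.slice_to l (by omega), PySem.List.slice_from l (by omega), hit, hu, hv]
      rw [hdel]
      have huvlen : (u ++ v).length = l.length - 4 := by
        simp [hul, hv]
        omega
      rw [if_neg (by rw [huvlen]; omega)]
      rw [ih (u ++ v) (i - 4 + 1) (a + 1) (by omega) (by rw [huvlen]; omega)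
        (by rw [huvlen]; omega) ?noocc]
      case noocc =>
        intro p hp
        have hp4 : p + 4 ≤ q := by omega
        rw [window_prefix u v p (by omega), hu, window_take l q p hp4]
        exact hnoocc p (by omega)
      have hcount : (l.foldl altStep ([], 0)).2 = ((u ++ v).foldl altStep ([], 0)).2 + 1 := by
        rw [hdecomp]
        apply count_remove u v 0
        intro p hpq
        rw [hul] at hpq
        have e : (l.drop p).take 4 = ((u ++ [1,2,3,1]).drop p).take 4 := by
          conv_lhs => rw [hdecomp]
          exact window_prefix (u ++ [1,2,3,1]) v p (by simp [hul]; omega)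
        rw [← e]
        exact hnoocc p (by omega)
      rw [hcount]
      ring
    · rw [if_neg hslice]
      simp only
      by_cases hbreak : i = (l.length : Int) + 1
      · rw [if_pos hbreak]
        have : PatFree l := by
          intro p
          by_cases hp : (p : Int) < i - 4
          · exact hnoocc p hp
          · exact take4_short l p (by omega)
        rw [patfree_count l this]
        ring
      · rw [if_neg hbreak]
        rw [ih l (i + 1) a (by omega) (by omega) (by omega) ?noocc2]
        case noocc2 =>
          intro p hp
          by_cases hlt : (p : Int) < i - 4
          · exact hnoocc p hlt
          · have h4 : 4 ≤ i := by omega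
            have hpq : p = (i - 4).toNat := by omega
            rw [hpq, ← slice_window l i h4]
            exact hslice

-- ===== VERDICT (by name: the statement is the Claim_ definition above) =====
theorem solution_spec : Claim_equal_solution := by
  intro l _
  unfold Spec_solution solution solution_alt
  split
  · next h =>
    rw [solutionLoop_eq (3 * l.length + 2) l 4 0 (by omega) (by omega) (by omega)
      (by intro q hq; omega)]
    simp
  · next h =>
    rw [patfree_count l (patfree_short l (by omega))]
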